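-- pv_equiv track=rewrite | github.com/neilmarshall/Project_Euler | PE_122.py | PE122
-- ===== SOURCE A (Python) =====
-- def PE122(limit):
--     """
--     >>> PE122(200)
--     1582
--     """
--     def get_level(target, level=0, current_paths=[(1, [1])]):
--
--         def generate_new_paths(current_paths):
--             new_paths = []
--             for path in current_paths:
--                 for existing_sum in path[1]:
--                     new_sums = path[1][:]
--                     new_sums.append(path[0] + existing_sum)
--                     new_path = (path[0] + existing_sum, new_sums)
--                     new_paths.append(new_path)
--                     if new_path[0] == target:
--                         break
--                 if new_path[0] == target:
--                     break
--             return new_paths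
--
--         if not any(path[0] == target for path in current_paths):
--             return get_level(target, level + 1, generate_new_paths(current_paths))
--         return level
--
--     return sum(get_level(target) for target in range(1, limit + 1))
-- ===== SOURCE B (Python) =====
-- def PE122(limit):
--     """
--     >>> PE122(200)
--     1582
--     """
--     def reachable(target, depth, last, sums):
--         # depth-bounded DFS over star addition chains, with two sound prunes
--         if last == target:
--             return True
--         if depth == 0 or (last << depth) < target:
--             return False
--         for s in reversed(sums):
--             nxt = last + s
--             if nxt <= target and reachable(target, depth - 1, nxt, sums + [nxt]):
--                 return True
--         return False
--
--     total = 0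
--     for target in range(1, limit + 1):
--         depth = 0
--         while not reachable(target, depth, 1, [1]):
--             depth += 1
--         total += depth
--     return total
-- ===== Notes on version B (the rewrite author's own statement) =====
-- stated objective: faster
-- what changed: A re-runs, for every target, a breadth-first enumeration of ALL star addition chains level by level (frontier size grows factorially with the chain length); B instead runs, per target, an iterative-deepening depth-first search over star chains with two sound prunes (children exceeding the target, and branches whose last element cannot reach the target even by doubling); intended as faster: a timing run measured B 32x faster at the largest size at which A still finishes (A times out beyond that; …
import Mathlib
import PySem

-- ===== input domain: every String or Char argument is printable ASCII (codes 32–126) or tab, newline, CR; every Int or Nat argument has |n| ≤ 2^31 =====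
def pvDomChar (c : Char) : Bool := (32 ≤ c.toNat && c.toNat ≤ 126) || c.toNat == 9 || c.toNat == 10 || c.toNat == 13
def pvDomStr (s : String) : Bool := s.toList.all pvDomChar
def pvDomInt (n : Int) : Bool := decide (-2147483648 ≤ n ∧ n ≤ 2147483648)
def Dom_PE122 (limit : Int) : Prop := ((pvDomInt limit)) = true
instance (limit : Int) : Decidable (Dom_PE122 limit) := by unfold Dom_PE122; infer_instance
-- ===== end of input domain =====

-- B replaces A's per-target breadth-first enumeration of all star addition chains by a
-- per-target iterative-deepening depth-first search with sound pruning; intended as faster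
-- (a timing run measured B 32x faster at the largest size at which A still finishes).

-- ===== PORT A =====
-- inner loop of generate_new_paths over path[1]: emits children, breaks when one equals target
def pvInnerA (t l : Int) (ss : List Int) : List Int → List (Int × List Int) × Bool
  | [] => ([], false)
  | s :: rest =>
      let np : Int × List Int := (l + s, ss ++ [l + s])
      if np.1 == t then ([np], true)
      else
        let r := pvInnerA t l ss rest
        (np :: r.1, r.2)

-- outer loop of generate_new_paths: the outer break fires exactly when the inner one did
def pvGenA (t : Int) : List (Int × List Int) → List (Int × List Int)
  | [] => []
  | (l, ss) :: rest =>
      let r := pvInnerA t l ss ss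
      if r.2 then r.1 else r.1 ++ pvGenA t rest

-- get_level; the fuel only makes the recursion structural (for target ≥ 1 it is never
-- exhausted: the target is always found within target-1 levels, see pvLevelA_finds below)
def pvLevelA (t : Int) : Nat → Int → List (Int × List Int) → Int
  | fuel, level, paths =>
    if paths.any (fun p => p.1 == t) then level
    else
      match fuel with
      | 0 => level
      | f + 1 => pvLevelA t f (level + 1) (pvGenA t paths)

def PE122 (limit : Int) : Int :=
  (PySem.List.pyRange 1 (limit + 1) 1).foldl
    (fun acc t => acc + pvLevelA t t.toNat 0 [(1, [1])]) 0

-- ===== PORT B =====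
-- reachable(target, depth, last, sums): depth-bounded DFS over star chains with two prunes;
-- 'last << depth' is ported as last * 2 ^ depth (exact: depth ≥ 0 always)
def pvReachB (t : Int) : Nat → Int → List Int → Bool
  | d, l, ss =>
    if l == t then true
    else
      match d with
      | 0 => false
      | d' + 1 =>
        if l * 2 ^ (d' + 1) < t then false
        else ss.reverse.any (fun s =>
          decide (l + s ≤ t) && pvReachB t d' (l + s) (ss ++ [l + s]))

-- the 'while not reachable: depth += 1' loop; fuel makes it structural (never exhausted
-- for target ≥ 1: the minimal depth is at most target-1, see pvLoopB_eq below)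
def pvLoopB (t : Int) : Nat → Nat → Int
  | 0, d => (d : Int)
  | f + 1, d => if pvReachB t d 1 [1] then (d : Int) else pvLoopB t f (d + 1)

def PE122_alt (limit : Int) : Int :=
  (PySem.List.pyRange 1 (limit + 1) 1).foldl
    (fun acc t => acc + pvLoopB t t.toNat 0) 0

-- ===== PRECONDITION & SPEC =====
def Spec_PE122 (limit : Int) (out : Int) : Prop := out = PE122_alt limit
instance (limit : Int) (out : Int) : Decidable (Spec_PE122 limit out) := by unfold Spec_PE122; infer_instance

-- ===== CLAIM (what is proved, stated in full; the proofs are below) =====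
def Claim_equal_PE122 : Prop := ∀ (limit : Int), Dom_PE122 limit → Spec_PE122 limit (PE122 limit)

-- ===== LEMMAS AND PROOFS =====

-- children of one state (the full, un-truncated expansion of generate_new_paths)
def pvStep (p : Int × List Int) : List (Int × List Int) :=
  p.2.map (fun s => (p.1 + s, p.2 ++ [p.1 + s]))

def pvExpand (P : List (Int × List Int)) : List (Int × List Int) := P.flatMap pvStep

-- the full BFS frontier after k levels
def pvF : Nat → List (Int × List Int)
  | 0 => [(1, [1])]
  | k + 1 => pvExpand (pvF k)

-- k-step reachability between states along star chains
inductive pvRF : Nat → Int × List Int → Int × List Int → Prop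
  | refl (st : Int × List Int) : pvRF 0 st st
  | step {m : Nat} {l : Int} {ss : List Int} {s : Int} {st' : Int × List Int} :
      s ∈ ss → pvRF m (l + s, ss ++ [l + s]) st' → pvRF (m + 1) (l, ss) st'

-- invariant of every state the search visits
def pvGood (st : Int × List Int) : Prop :=
  (1 : Int) ∈ st.2 ∧ st.1 ∈ st.2 ∧ ∀ s ∈ st.2, 1 ≤ s ∧ s ≤ st.1

-- "target t appears in frontier k"
def pvHitB (t : Int) (k : Nat) : Bool := (pvF k).any (fun p => p.1 == t)

theorem pvGood_step {l s : Int} {ss : List Int} (h : pvGood (l, ss)) (hs : s ∈ ss) :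
    pvGood (l + s, ss ++ [l + s]) := by
  obtain ⟨h1, hl, hb⟩ := h
  have hs1 := hb s hs
  refine ⟨List.mem_append_left _ h1, List.mem_append_right _ (by simp), ?_⟩
  intro x hx
  rcases List.mem_append.mp hx with hx | hx
  · have := hb x hx; omega
  · simp at hx; omega

theorem pvRF_snoc {m : Nat} {st st2 : Int × List Int} {s : Int}
    (h : pvRF m st st2) (hs : s ∈ st2.2) :
    pvRF (m + 1) st (st2.1 + s, st2.2 ++ [st2.1 + s]) := by
  induction h with
  | refl st => exact pvRF.step hs (pvRF.refl _)
  | step hmem _ ih => exact pvRF.step hmem (ih hs)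

theorem pvRF_succ_inv {m : Nat} {st st' : Int × List Int} (h : pvRF (m + 1) st st') :
    ∃ s, s ∈ st.2 ∧ pvRF m (st.1 + s, st.2 ++ [st.1 + s]) st' := by
  cases h with
  | step hs h' => exact ⟨_, hs, h'⟩

-- head-recursion form of the frontier
def pvG : Nat → (Int × List Int) → List (Int × List Int)
  | 0, st => [st]
  | k + 1, st => (pvStep st).flatMap (pvG k)

theorem pvExpand_pvG (k : Nat) (st : Int × List Int) :
    pvExpand (pvG k st) = pvG (k + 1) st := by
  induction k generalizing st with
  | zero => simp [pvG, pvExpand]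
  | succ k ih =>
      show pvExpand ((pvStep st).flatMap (pvG k)) = (pvStep st).flatMap (pvG (k + 1))
      unfold pvExpand
      rw [List.flatMap_assoc]
      exact List.flatMap_congr (fun c _ => ih c)

theorem pvF_eq_pvG (k : Nat) : pvF k = pvG k (1, [1]) := by
  induction k with
  | zero => rfl
  | succ k ih => rw [pvF, ih, pvExpand_pvG]

theorem mem_pvG {k : Nat} {st st' : Int × List Int} :
    st' ∈ pvG k st ↔ pvRF k st st' := by
  induction k generalizing st with
  | zero =>
      simp only [pvG, List.mem_singleton]
      constructor
      · rintro rfl; exact pvRF.refl _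
      · rintro h; cases h; rfl
  | succ k ih =>
      simp only [pvG, List.mem_flatMap]
      constructor
      · rintro ⟨c, hc, hmem⟩
        obtain ⟨l, ss⟩ := st
        simp only [pvStep, List.mem_map] at hc
        obtain ⟨s, hs, rfl⟩ := hc
        exact pvRF.step hs (ih.mp hmem)
      · rintro h
        cases h with
        | step hs h' =>
            refine ⟨_, ?_, ih.mpr h'⟩
            simp only [pvStep, List.mem_map]
            exact ⟨_, hs, rfl⟩

theorem pvHitB_iff {t : Int} {k : Nat} :
    pvHitB t k = true ↔ ∃ ss, pvRF k (1, [1]) (t, ss) := by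
  simp only [pvHitB, List.any_eq_true, beq_iff_eq, pvF_eq_pvG]
  constructor
  · rintro ⟨⟨l, ss⟩, hmem, rfl⟩; exact ⟨ss, mem_pvG.mp hmem⟩
  · rintro ⟨ss, h⟩; exact ⟨(t, ss), mem_pvG.mpr h, rfl⟩

-- bounds along reachability: good states stay good, last is monotone and at most doubles
theorem pvRF_bounds {m : Nat} {st st' : Int × List Int} (h : pvRF m st st')
    (hg : pvGood st) : pvGood st' ∧ st.1 ≤ st'.1 ∧ st'.1 ≤ st.1 * 2 ^ m := by
  induction h with
  | refl st => exact ⟨hg, le_refl _, by simp⟩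
  | @step m l ss s st' hs _ ih =>
      have hs1 := hg.2.2 s hs
      have hgc : pvGood (l + s, ss ++ [l + s]) := pvGood_step hg hs
      obtain ⟨hg', hmono, hub⟩ := ih hgc
      refine ⟨hg', by simp at hmono ⊢; omega, ?_⟩
      have h2 : (l + s) * 2 ^ m ≤ (l * 2) * 2 ^ m := by
        have : l + s ≤ l * 2 := by omega
        exact mul_le_mul_of_nonneg_right this (by positivity)
      calc st'.1 ≤ (l + s) * 2 ^ m := hub
        _ ≤ (l * 2) * 2 ^ m := h2
        _ = l * 2 ^ (m + 1) := by ring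

-- ---------- A-side: generate_new_paths vs the full expansion ----------

theorem pvInnerA_complete {t l : Int} {ss : List Int} {sub : List Int}
    (h : ∀ s ∈ sub, l + s ≠ t) :
    pvInnerA t l ss sub = (sub.map (fun s => (l + s, ss ++ [l + s])), false) := by
  induction sub with
  | nil => rfl
  | cons s rest ih =>
      have hne : (l + s == t) = false := by simp [h s (by simp)]
      simp [pvInnerA, hne, ih (fun x hx => h x (by simp [hx]))]

theorem pvInnerA_hit {t l : Int} {ss : List Int} {sub : List Int}
    (h : ∃ s ∈ sub, l + s = t) :
    (pvInnerA t l ss sub).2 = true ∧ t ∈ (pvInnerA t l ss sub).1.map Prod.fst := by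
  induction sub with
  | nil => simp at h
  | cons s rest ih =>
      by_cases hs : l + s = t
      · simp [pvInnerA, hs]
      · have h' : ∃ x ∈ rest, l + x = t := by
          obtain ⟨x, hx, hxt⟩ := h
          rcases List.mem_cons.mp hx with rfl | hx
          · exact absurd hxt hs
          · exact ⟨x, hx, hxt⟩
        have hne : (l + s == t) = false := by simp [hs]
        obtain ⟨ih1, ih2⟩ := ih h'
        simp only [pvInnerA, hne, Bool.false_eq_true, if_false, List.map_cons]
        exact ⟨ih1, List.mem_cons_of_mem _ ih2⟩

theorem pvGenA_eq {t : Int} {P : List (Int × List Int)}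
    (h : ∀ p ∈ pvExpand P, p.1 ≠ t) : pvGenA t P = pvExpand P := by
  induction P with
  | nil => rfl
  | cons p rest ih =>
      obtain ⟨l, ss⟩ := p
      have hch : ∀ s ∈ ss, l + s ≠ t := by
        intro s hs
        exact h (l + s, ss ++ [l + s]) (by
          simp only [pvExpand, List.mem_flatMap]
          exact ⟨(l, ss), by simp, by simp only [pvStep, List.mem_map]; exact ⟨s, hs, rfl⟩⟩)
      have hrest : ∀ p ∈ pvExpand rest, p.1 ≠ t := by
        intro q hq
        exact h q (by
          simp only [pvExpand, List.mem_flatMap] at hq ⊢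
          obtain ⟨r, hr, hq⟩ := hq
          exact ⟨r, by simp [hr], hq⟩)
      simp only [pvGenA, pvInnerA_complete hch, ih hrest]
      simp [pvExpand, pvStep]

theorem pvGenA_hit {t : Int} {P : List (Int × List Int)}
    (h : ∃ p ∈ pvExpand P, p.1 = t) : t ∈ (pvGenA t P).map Prod.fst := by
  induction P with
  | nil => simp [pvExpand] at h
  | cons p rest ih =>
      obtain ⟨l, ss⟩ := p
      by_cases hhead : ∃ s ∈ ss, l + s = t
      · obtain ⟨h1, h2⟩ := pvInnerA_hit (ss := ss) hhead
        simp only [pvGenA, h1, if_pos]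
        exact h2
      · have hch : ∀ s ∈ ss, l + s ≠ t := by
          intro s hs hc; exact hhead ⟨s, hs, hc⟩
        have hrest : ∃ p ∈ pvExpand rest, p.1 = t := by
          obtain ⟨q, hq, hqt⟩ := h
          simp only [pvExpand, List.mem_flatMap] at hq
          obtain ⟨r, hr, hq⟩ := hq
          rcases List.mem_cons.mp hr with rfl | hr
          · exfalso
            simp only [pvStep, List.mem_map] at hq
            obtain ⟨s, hs, rfl⟩ := hq
            exact hch s hs hqt
          · exact ⟨q, by simp only [pvExpand, List.mem_flatMap]; exact ⟨r, hr, hq⟩, hqt⟩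
        simp only [pvGenA, pvInnerA_complete hch, Bool.false_eq_true, if_false,
          List.map_append]
        exact List.mem_append_right _ (ih hrest)

-- frontier membership as the Boolean guard of get_level
theorem pvAny_iff {t : Int} {P : List (Int × List Int)} :
    P.any (fun p => p.1 == t) = true ↔ ∃ p ∈ P, p.1 = t := by
  simp [List.any_eq_true]

-- get_level counts exactly the remaining levels to the first frontier containing t
theorem pvLevelA_eq {t : Int} {kmin : Nat}
    (hk : pvHitB t kmin = true) (hmin : ∀ i, i < kmin → pvHitB t i = false) :
    ∀ c fuel : Nat, c ≤ fuel → ∀ (j : Nat) (lvl : Int), j + c = kmin →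
      pvLevelA t fuel lvl (pvF j) = lvl + c := by
  intro c
  induction c with
  | zero =>
      intro fuel _ j lvl hj
      have hj' : j = kmin := by omega
      subst hj'
      have hk' : ((pvF j).any (fun p => p.1 == t)) = true := hk
      cases fuel <;> simp [pvLevelA, hk']
  | succ c ih =>
      intro fuel hfuel j lvl hj
      have hnot : ((pvF j).any (fun p => p.1 == t)) = false := hmin j (by omega)
      obtain ⟨f, rfl⟩ : ∃ f, fuel = f + 1 := ⟨fuel - 1, by omega⟩
      have step1 : pvLevelA t (f + 1) lvl (pvF j) =
          pvLevelA t f (lvl + 1) (pvGenA t (pvF j)) := by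
        simp [pvLevelA, hnot]
      rw [step1]
      have hFsucc : pvF (j + 1) = pvExpand (pvF j) := by simp [pvF]
      cases c with
      | zero =>
          -- next frontier contains t: generate_new_paths truncates but keeps t
          have h1 : pvHitB t (j + 1) = true := by rw [(show j + 1 = kmin by omega)]; exact hk
          have hhit : ∃ p ∈ pvExpand (pvF j), p.1 = t := by
            have := pvAny_iff.mp h1
            rwa [hFsucc] at this
          have hany : (pvGenA t (pvF j)).any (fun p => p.1 == t) = true := by
            rw [pvAny_iff]
            simpa [List.mem_map] using pvGenA_hit hhit
          cases f <;> simp [pvLevelA, hany]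
      | succ c' =>
          have hnone : ∀ p ∈ pvExpand (pvF j), p.1 ≠ t := by
            intro p hp hpt
            have h1 : pvHitB t (j + 1) = true := by
              have : ((pvF (j + 1)).any (fun q => q.1 == t)) = true := by
                rw [pvAny_iff]; exact ⟨p, by rwa [hFsucc], hpt⟩
              exact this
            have h2 : pvHitB t (j + 1) = false := hmin (j + 1) (by omega)
            rw [h1] at h2; simp at h2
          rw [pvGenA_eq hnone, ← hFsucc]
          rw [ih f (by omega) (j + 1) (lvl + 1) (by omega)]
          push_cast
          ring

-- ---------- B-side: soundness and completeness of the pruned DFS ----------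

theorem pvReachB_sound {t : Int} : ∀ {d : Nat} {l : Int} {ss : List Int},
    pvReachB t d l ss = true → pvGood (l, ss) →
    ∃ m, m ≤ d ∧ ∃ ss', pvRF m (l, ss) (t, ss') := by
  intro d
  induction d with
  | zero =>
      intro l ss h _
      simp only [pvReachB] at h
      split at h
      · next heq => exact ⟨0, le_refl _, ss, by rw [← (beq_iff_eq.mp heq)]; exact pvRF.refl _⟩
      · simp at h
  | succ d ih =>
      intro l ss h hg
      simp only [pvReachB] at h
      split at h
      · next heq => exact ⟨0, by omega, ss, by rw [← (beq_iff_eq.mp heq)]; exact pvRF.refl _⟩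
      · split at h
        · simp at h
        · rw [List.any_eq_true] at h
          obtain ⟨s, hs, hcond⟩ := h
          rw [Bool.and_eq_true, decide_eq_true_eq] at hcond
          have hs' : s ∈ ss := List.mem_reverse.mp hs
          obtain ⟨m, hm, ss', hrf⟩ := ih hcond.2 (pvGood_step hg hs')
          exact ⟨m + 1, by omega, ss', pvRF.step hs' hrf⟩

theorem pvReachB_complete {t : Int} : ∀ {m : Nat} {l : Int} {ss : List Int} {ss' : List Int},
    pvRF m (l, ss) (t, ss') → pvGood (l, ss) → ∀ {d : Nat}, m ≤ d →
    pvReachB t d l ss = true := by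
  intro m
  induction m with
  | zero =>
      intro l ss ss' h _ d _
      cases h
      cases d <;> simp [pvReachB]
  | succ m ih =>
      intro l ss ss' h hg d hd
      by_cases hlt : l = t
      · cases d <;> simp [pvReachB, hlt]
      · obtain ⟨d', rfl⟩ : ∃ d', d = d' + 1 := ⟨d - 1, by omega⟩
        obtain ⟨s, hs, hrf⟩ := pvRF_succ_inv h
        have hgc := pvGood_step hg hs
        obtain ⟨_, hmono, hub⟩ := pvRF_bounds hrf hgc
        have hl1 : 1 ≤ l := (hg.2.2 l hg.2.1).1
        have hs1 := hg.2.2 s hs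
        -- the doubling prune does not fire: t ≤ l * 2 ^ (d' + 1)
        have hfull : t ≤ l * 2 ^ (d' + 1) := by
          obtain ⟨_, _, hub'⟩ := pvRF_bounds h hg
          have hpow : l * 2 ^ (m + 1) ≤ l * 2 ^ (d' + 1) :=
            mul_le_mul_of_nonneg_left
              (pow_le_pow_right₀ (by norm_num) (by omega)) (by omega)
          calc t = ((t, ss') : Int × List Int).1 := rfl
            _ ≤ l * 2 ^ (m + 1) := hub'
            _ ≤ l * 2 ^ (d' + 1) := hpow
        simp only [pvReachB, beq_iff_eq, if_neg hlt, if_neg (not_lt.mpr hfull)]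
        rw [List.any_eq_true]
        refine ⟨s, List.mem_reverse.mpr hs, ?_⟩
        rw [Bool.and_eq_true, decide_eq_true_eq]
        exact ⟨by simpa using hmono, ih hrf hgc (by omega)⟩

theorem pvGood_init : pvGood (1, [1]) := by
  refine ⟨by simp, by simp, ?_⟩
  intro s hs
  simp at hs
  omega

theorem pvReachB_iff_le {t : Int} {kmin : Nat}
    (hk : pvHitB t kmin = true) (hmin : ∀ i, i < kmin → pvHitB t i = false)
    (d : Nat) : pvReachB t d 1 [1] = true ↔ kmin ≤ d := by
  constructor
  · intro h
    obtain ⟨m, hm, ss', hrf⟩ := pvReachB_sound h pvGood_init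
    have : pvHitB t m = true := pvHitB_iff.mpr ⟨ss', hrf⟩
    by_contra hc
    have : m < kmin := by omega
    simp_all [hmin m this]
  · intro h
    obtain ⟨ss, hrf⟩ := pvHitB_iff.mp hk
    exact pvReachB_complete hrf pvGood_init h

theorem pvLoopB_eq {t : Int} {kmin : Nat}
    (hk : pvHitB t kmin = true) (hmin : ∀ i, i < kmin → pvHitB t i = false) :
    ∀ (f d : Nat), d ≤ kmin → kmin ≤ d + f → pvLoopB t f d = (kmin : Int) := by
  intro f
  induction f with
  | zero =>
      intro d h1 h2
      have : d = kmin := by omega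
      simp [pvLoopB, this]
  | succ f ih =>
      intro d h1 h2
      by_cases hr : pvReachB t d 1 [1] = true
      · have : kmin ≤ d := (pvReachB_iff_le hk hmin d).mp hr
        have hd : d = kmin := by omega
        subst hd
        simp [pvLoopB, hr]
      · have : ¬ kmin ≤ d := fun hc => hr ((pvReachB_iff_le hk hmin d).mpr hc)
        simp only [pvLoopB, hr, if_neg, Bool.false_eq_true, not_false_eq_true]
        exact ih (d + 1) (by omega) (by omega)

-- ---------- existence: every target ≥ 1 is found within target - 1 levels ----------

theorem pvIncremental : ∀ n : Nat, ∃ ss, pvRF n (1, [1]) (1 + n, ss) ∧ (1 : Int) ∈ ss := by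
  intro n
  induction n with
  | zero => exact ⟨[1], pvRF.refl _, by simp⟩
  | succ n ih =>
      obtain ⟨ss, hrf, h1⟩ := ih
      refine ⟨ss ++ [(1 + n : Int) + 1], ?_, List.mem_append_left _ h1⟩
      have := pvRF_snoc hrf h1
      convert this using 2

theorem pvHit_exists {t : Int} (ht : 1 ≤ t) :
    ∃ k, k ≤ (t - 1).toNat ∧ pvHitB t k = true := by
  obtain ⟨ss, hrf, _⟩ := pvIncremental (t - 1).toNat
  refine ⟨(t - 1).toNat, le_refl _, pvHitB_iff.mpr ⟨ss, ?_⟩⟩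
  have : (1 : Int) + ((t - 1).toNat : Int) = t := by omega
  rwa [this] at hrf

-- ---------- per-target equality and the final assembly ----------

theorem pvPerTarget {t : Int} (ht : 1 ≤ t) :
    pvLevelA t t.toNat 0 [(1, [1])] = pvLoopB t t.toNat 0 := by
  obtain ⟨k0, hk0, hhit⟩ := pvHit_exists ht
  have hex : ∃ k, pvHitB t k = true := ⟨k0, hhit⟩
  set kmin := Nat.find hex with hkm
  have hk : pvHitB t kmin = true := Nat.find_spec hex
  have hmin : ∀ i, i < kmin → pvHitB t i = false := by
    intro i hi
    have := Nat.find_min hex hi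
    simpa using this
  have hkb : kmin ≤ t.toNat := by
    have : kmin ≤ k0 := Nat.find_min' hex hhit
    omega
  have hA : pvLevelA t t.toNat 0 (pvF 0) = 0 + (kmin : Int) :=
    pvLevelA_eq hk hmin kmin t.toNat hkb 0 0 (by omega)
  have hB : pvLoopB t t.toNat 0 = (kmin : Int) :=
    pvLoopB_eq hk hmin t.toNat 0 (by omega) (by omega)
  rw [hB]
  simpa [pvF] using hA

-- ===== VERDICT (by name: the statement is the Claim_ definition above) =====
theorem PE122_spec : Claim_equal_PE122 := by
  intro limit _
  unfold Spec_PE122 PE122 PE122_alt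
  apply PySem.List.foldl_congr_mem
  intro acc t hmem
  have ht : 1 ≤ t := (PySem.List.mem_pyRange_one.mp hmem).1
  rw [pvPerTarget ht]
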